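-- pv_equiv track=rewrite | github.com/caelan-schneider/BostonSalaries | utils.py | _impute_missing_years
-- ===== SOURCE A (Python) =====
-- from typing import List, Dict
--
-- def _impute_missing_years(docs: List[Dict], fields: List[str], default=0) -> List[Dict]:
--     """
--     Returns list of documents with all years included. The years that were missing
--     in the input list are added with given fields set to the default.
--
--     Params:
--         docs: List of dicts that each have a "Year" field.
--         fields: The fields in the imputed docs that should be set to the default value.
--         default: The default value.
--     """
--
--     existing_years = set(doc["Year"] for doc in docs if "Year" in doc.keys())
--     if len(existing_years) > 1:
--         all_years = set(year for year in range(min(existing_years), max(existing_years)+1))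
--         missing_years = list(all_years - existing_years)
--
--         for year in missing_years:
--             doc = {field: default for field in fields}
--             doc["Year"] = year
--             docs.append(doc)
--
--         docs.sort(key=lambda doc: doc["Year"])
--
--     return docs
-- ===== SOURCE B (Python) =====
-- def _impute_missing_years(docs, fields, default=0):
--     # Group docs by year (preserving order), then emit one pass over the year range.
--     # Mutates docs in place like the original (docs[:] = result) and returns it.
--     pairs = [(doc["Year"], doc) for doc in docs if "Year" in doc]
--     groups = {}
--     for year, doc in pairs:
--         groups[year] = groups.get(year, []) + [doc]
--     if len(groups) < 2:
--         return docs
--     all_years = list(range(min(groups), max(groups) + 1))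
--     result = []
--     for year in all_years:
--         if year in groups:
--             result += groups[year]
--         else:
--             new_doc = {field: default for field in fields}
--             new_doc["Year"] = year
--             result.append(new_doc)
--     docs[:] = result
--     return docs
-- ===== Notes on version B (the rewrite author's own statement) =====
-- stated objective: alternative
-- what changed: B groups the docs by year into a dict in one pass and emits the result by a single sweep over the year range (existing bucket or a fresh default doc per year), instead of A's append-filler-docs-then-stable-sort; equal return value, and both mutate docs in place.
import Mathlib
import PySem

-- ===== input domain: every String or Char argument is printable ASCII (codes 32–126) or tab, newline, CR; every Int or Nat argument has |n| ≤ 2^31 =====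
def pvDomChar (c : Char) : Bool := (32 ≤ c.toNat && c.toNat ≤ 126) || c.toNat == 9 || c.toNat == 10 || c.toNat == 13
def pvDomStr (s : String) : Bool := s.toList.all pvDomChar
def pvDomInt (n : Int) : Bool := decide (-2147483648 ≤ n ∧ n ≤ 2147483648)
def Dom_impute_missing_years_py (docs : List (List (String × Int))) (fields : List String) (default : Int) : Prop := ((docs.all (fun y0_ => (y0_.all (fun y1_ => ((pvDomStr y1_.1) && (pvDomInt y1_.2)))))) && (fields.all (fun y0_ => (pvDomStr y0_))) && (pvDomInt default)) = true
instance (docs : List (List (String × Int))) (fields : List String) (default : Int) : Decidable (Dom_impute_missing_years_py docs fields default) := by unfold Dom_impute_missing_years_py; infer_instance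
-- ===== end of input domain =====

-- B groups the docs by year once and emits one pass over the year range instead of
-- appending filler docs and re-sorting (objective: alternative decomposition).
-- Both A and B mutate `docs` in place (A appends+sorts, B assigns docs[:]); the
-- equivalence proved here is about the RETURN value.

-- ===== PORT A =====

-- the filler document {field: default for field in fields}; doc["Year"] = year  (identical code in both Pythons)
def pvMkDoc (fields : List String) (default : Int) (year : Int) : List (String × Int) :=
  ((fields.foldl (fun d f => d.insert f default) (PySem.Dict.empty)).insert "Year" year).items

def impute_missing_years_py (docs : List (List (String × Int))) (fields : List String) (default : Int) : List (List (String × Int)) :=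
  let existing_years : PySem.Set Int :=
    PySem.Set.ofList (docs.filterMap (fun doc => (PySem.Dict.mk doc).get? "Year"))
  if 1 < existing_years.length then
    -- min/max of a nonempty set; the branch guarantees nonemptiness, so .getD 0 never fires
    let mn : Int := ((PySem.List.min? existing_years (fun y => y)).getD 0)
    let mx : Int := ((PySem.List.max? existing_years (fun y => y)).getD 0)
    let all_years : PySem.Set Int := PySem.Set.ofList (PySem.List.pyRange mn (mx + 1) 1)
    let missing_years : List Int := PySem.Set.diff all_years existing_years
    let docs2 := docs ++ missing_years.map (fun year => pvMkDoc fields default year)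
    -- docs.sort(key=lambda doc: doc["Year"]): doc["Year"] raises KeyError on a year-less
    -- doc; Pre_ excludes that, so getD's default never fires inside Pre_
    PySem.List.sorted docs2 (fun doc => (PySem.Dict.mk doc).getD "Year" 0) false
  else docs

-- ===== PORT B =====
def impute_missing_years_py_alt (docs : List (List (String × Int))) (fields : List String) (default : Int) : List (List (String × Int)) :=
  let pairs : List (Int × List (String × Int)) :=
    docs.filterMap (fun doc =>
      if (PySem.Dict.mk doc).contains "Year"
      then some ((PySem.Dict.mk doc).getD "Year" 0, doc) else none)
  let groups : PySem.Dict Int (List (List (String × Int))) :=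
    pairs.foldl (fun g p => g.modify p.1 [] (fun l => l ++ [p.2])) PySem.Dict.empty
  if groups.size < 2 then docs
  else
    let mn : Int := ((PySem.List.min? groups.keys (fun y => y)).getD 0)
    let mx : Int := ((PySem.List.max? groups.keys (fun y => y)).getD 0)
    (PySem.List.pyRange mn (mx + 1) 1).foldl
      (fun result year =>
        if groups.contains year then result ++ groups.getD year []
        else result ++ [pvMkDoc fields default year]) []

-- ===== PRECONDITION & SPEC =====
-- Pre_ excludes exactly the inputs where A raises: with at least two distinct years
-- present, docs.sort(key=lambda doc: doc["Year"]) raises KeyError if any doc lacks "Year".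
def Pre_impute_missing_years_py (docs : List (List (String × Int))) (fields : List String) (default : Int) : Prop :=
  (PySem.List.dedup (docs.filterMap (fun doc => (PySem.Dict.mk doc).get? "Year"))).length ≤ 1
  ∨ ∀ doc ∈ docs, (PySem.Dict.mk doc).contains "Year" = true
instance (docs : List (List (String × Int))) (fields : List String) (default : Int) : Decidable (Pre_impute_missing_years_py docs fields default) := by unfold Pre_impute_missing_years_py; infer_instance

def pvWitness_impute_missing_years_py : (List (List (String × Int))) × List String × Int :=
  ([[("Year", 0), ("x", 5)], [("Year", 3)]], (["x"], 0))

def Spec_impute_missing_years_py (docs : List (List (String × Int))) (fields : List String) (default : Int) (out : List (List (String × Int))) : Prop := out = impute_missing_years_py_alt docs fields default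
instance (docs : List (List (String × Int))) (fields : List String) (default : Int) (out : List (List (String × Int))) : Decidable (Spec_impute_missing_years_py docs fields default out) := by unfold Spec_impute_missing_years_py; infer_instance


-- ===== CLAIM (what is proved, stated in full; the proofs are below) =====
def Claim_equal_impute_missing_years_py : Prop := ∀ (docs : List (List (String × Int))) (fields : List String) (default : Int), Dom_impute_missing_years_py docs fields default → Pre_impute_missing_years_py docs fields default → Spec_impute_missing_years_py docs fields default (impute_missing_years_py docs fields default)

-- ===== LEMMAS AND PROOFS =====

theorem pv_insertBy_cons {α : Type} (before : α → α → Bool) (x a : α) (l : List α) :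
    PySem.List.insertBy before x (a :: l) =
      if before x a then x :: a :: l else a :: PySem.List.insertBy before x l := rfl

theorem pv_insertBy_append_left {α : Type} (before : α → α → Bool) (x : α) (as bs : List α)
    (h : ∀ a ∈ as, before x a = false) :
    PySem.List.insertBy before x (as ++ bs) = as ++ PySem.List.insertBy before x bs := by
  induction as with
  | nil => simp
  | cons a as ih =>
      have hfa : before x a = false := h a (by simp)
      rw [List.cons_append, pv_insertBy_cons, hfa]
      rw [if_neg (by simp), ih (fun a' ha' => h a' (by simp [ha']))]
      rfl

theorem pv_insertBy_all_before {α : Type} (before : α → α → Bool) (x : α) (bs : List α)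
    (h : ∀ a ∈ bs, before x a = true) :
    PySem.List.insertBy before x bs = x :: bs := by
  cases bs with
  | nil => rfl
  | cons a l => rw [pv_insertBy_cons, if_pos (h a (by simp))]

theorem pv_insert_bucket {α : Type} (key : α → Int) (r : List Int) (x : α) (p : List α)
    (hr : r.Pairwise (· < ·)) (hx : key x ∈ r) :
    PySem.List.insertBy (fun a b => decide (key a < key b)) x
        (r.flatMap (fun y => p.filter (fun z => key z == y)))
      = r.flatMap (fun y => (p ++ [x]).filter (fun z => key z == y)) := by
  induction r generalizing p with
  | nil => simp at hx
  | cons y r' ih =>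
      rcases List.pairwise_cons.mp hr with ⟨hy, hr'⟩
      simp only [List.flatMap_cons, List.filter_append]
      by_cases hxy : key x = y
      · have h1 : ∀ a ∈ p.filter (fun z => key z == y), (fun a b => decide (key a < key b)) x a = false := by
          intro a ha
          simp only [List.mem_filter, beq_iff_eq] at ha
          simp [ha.2, hxy]
        rw [pv_insertBy_append_left _ x (p.filter (fun z => key z == y)) _ h1]
        have h2 : ∀ a ∈ r'.flatMap (fun z => p.filter (fun w => key w == z)), (fun a b => decide (key a < key b)) x a = true := by
          intro a ha
          simp only [List.mem_flatMap, List.mem_filter, beq_iff_eq] at ha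
          rcases ha with ⟨z, hz, _, hkz⟩
          simp [hkz, hxy, hy z hz]
        rw [pv_insertBy_all_before _ x _ h2]
        have h3 : r'.flatMap (fun z => List.filter (fun w => key w == z) p ++ List.filter (fun w => key w == z) [x])
            = r'.flatMap (fun z => List.filter (fun w => key w == z) p) := by
          apply List.flatMap_congr
          intro z hz
          have : List.filter (fun w => key w == z) [x] = ([] : List α) := by
            have : (key x == z) = false := by simp [hxy]; exact (hy z hz).ne
            simp [this]
          rw [this, List.append_nil]
        rw [h3]
        simp [hxy]
      · have hx' : key x ∈ r' := by
          rcases List.mem_cons.mp hx with h | h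
          · exact absurd h hxy
          · exact h
        have h1 : ∀ a ∈ p.filter (fun z => key z == y), (fun a b => decide (key a < key b)) x a = false := by
          intro a ha
          simp only [List.mem_filter, beq_iff_eq] at ha
          have : y < key x := hy _ hx'
          simp only [decide_eq_false_iff_not, not_lt, ha.2]
          omega
        rw [pv_insertBy_append_left _ x (p.filter (fun z => key z == y)) _ h1]
        rw [ih p hr' hx']
        have h4 : List.filter (fun w => key w == y) [x] = ([] : List α) := by
          simp [beq_iff_eq, hxy]
        simp [h4]

theorem pv_sorted_buckets {α : Type} (key : α → Int) (r : List Int) (xs : List α)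
    (hr : r.Pairwise (· < ·)) (hk : ∀ x ∈ xs, key x ∈ r) :
    PySem.List.sorted xs key false = r.flatMap (fun y => xs.filter (fun z => key z == y)) := by
  rw [PySem.List.sorted_eq_foldl_insertBy]
  suffices h : ∀ (ys p : List α), (∀ x ∈ ys, key x ∈ r) →
      ys.foldl (fun acc x => PySem.List.insertBy (fun a b => decide (key a < key b)) x acc)
        (r.flatMap (fun y => p.filter (fun z => key z == y)))
      = r.flatMap (fun y => (p ++ ys).filter (fun z => key z == y)) by
    have h0 := h xs [] hk
    have e : r.flatMap (fun y => ([] : List α).filter (fun z => key z == y)) = [] := by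
      simp
    rw [e] at h0
    simpa using h0
  intro ys
  induction ys with
  | nil => intro p _; simp
  | cons x ys ih =>
      intro p hys
      simp only [List.foldl_cons]
      rw [pv_insert_bucket key r x p hr (hys x (by simp))]
      have h1 := ih (p ++ [x]) (fun z hz => hys z (by simp [hz]))
      rw [h1]
      simp


theorem pv_pairs_map_fst (docs : List (List (String × Int))) :
    (docs.filterMap (fun doc =>
        if (PySem.Dict.mk doc).contains "Year"
        then some ((PySem.Dict.mk doc).getD "Year" 0, doc) else none)).map (fun p => p.1)
      = docs.filterMap (fun doc => (PySem.Dict.mk doc).get? "Year") := by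
  induction docs with
  | nil => rfl
  | cons d ds ih =>
      cases h : (PySem.Dict.mk d).get? "Year" with
      | none =>
          have hc : (PySem.Dict.mk d).contains "Year" = false := by
            rw [PySem.Dict.contains_eq_isSome_get?, h]; rfl
          rw [List.filterMap_cons_none (by rw [hc]; rfl), List.filterMap_cons_none (f := fun doc => (PySem.Dict.mk doc).get? "Year") h]
          exact ih
      | some y =>
          have hc : (PySem.Dict.mk d).contains "Year" = true := by
            rw [PySem.Dict.contains_eq_isSome_get?, h]; rfl
          have hg : (PySem.Dict.mk d).getD "Year" 0 = y := by
            rw [PySem.Dict.getD_eq_get?_getD, h]; rfl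
          rw [List.filterMap_cons_some (by rw [hc]; rfl), List.filterMap_cons_some (f := fun doc => (PySem.Dict.mk doc).get? "Year") h]
          rw [List.map_cons, ih, hg]

theorem pv_pairs_eq_map (docs : List (List (String × Int)))
    (h : ∀ doc ∈ docs, (PySem.Dict.mk doc).contains "Year" = true) :
    docs.filterMap (fun doc =>
        if (PySem.Dict.mk doc).contains "Year"
        then some ((PySem.Dict.mk doc).getD "Year" 0, doc) else none)
      = docs.map (fun doc => ((PySem.Dict.mk doc).getD "Year" 0, doc)) := by
  induction docs with
  | nil => rfl
  | cons d ds ih =>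
      simp only [List.filterMap_cons, h d (by simp), if_pos, List.map_cons]
      rw [ih (fun z hz => h z (by simp [hz]))]

theorem pv_key_mkdoc (fields : List String) (default : Int) (year : Int) :
    (PySem.Dict.mk (pvMkDoc fields default year)).getD "Year" 0 = year := by
  show ((fields.foldl (fun d f => d.insert f default) (PySem.Dict.empty)).insert "Year" year).getD "Year" 0 = year
  exact PySem.Dict.getD_insert_self _ _ _ _

theorem pv_filter_nodup_mem {α : Type} [DecidableEq α] (l : List α) (y : α)
    (hnd : l.Nodup) (hy : y ∈ l) : l.filter (fun z => z == y) = [y] := by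
  induction l with
  | nil => simp at hy
  | cons a l ih =>
      rcases List.nodup_cons.mp hnd with ⟨ha, hnd'⟩
      rcases List.mem_cons.mp hy with h | h
      · subst h
        have hf : l.filter (fun z => z == y) = [] :=
          List.filter_eq_nil_iff.mpr (fun z hz => by simp only [beq_iff_eq]; rintro rfl; exact ha hz)
        simp [List.filter_cons, hf]
      · have hne : (a == y) = false := by
          simp only [beq_eq_false_iff_ne, ne_eq]; rintro rfl; exact ha h
        simp [List.filter_cons, hne, ih hnd' h]

theorem pv_agree (docs : List (List (String × Int))) (fields : List String) (default : Int)
    (hpre : Pre_impute_missing_years_py docs fields default) :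
    impute_missing_years_py docs fields default = impute_missing_years_py_alt docs fields default := by
  have keys_eq :
      ((docs.filterMap (fun doc =>
          if (PySem.Dict.mk doc).contains "Year"
          then some ((PySem.Dict.mk doc).getD "Year" 0, doc) else none)).foldl
        (fun g p => g.modify p.1 [] (fun l => l ++ [p.2]))
        (PySem.Dict.empty : PySem.Dict Int (List (List (String × Int))))).keys
      = PySem.Set.ofList (docs.filterMap (fun doc => (PySem.Dict.mk doc).get? "Year")) := by
    have h1 := PySem.Dict.keys_foldl_modify_key (κ := Int) (ν := List (List (String × Int)))
      (docs.filterMap (fun doc =>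
          if (PySem.Dict.mk doc).contains "Year"
          then some ((PySem.Dict.mk doc).getD "Year" 0, doc) else none))
      (fun p => p.1) [] (fun _ p l => l ++ [p.2]) PySem.Dict.empty
    rw [h1]
    rw [PySem.Dict.keys_empty, PySem.Set.update_nil_left, pv_pairs_map_fst]
  simp only [impute_missing_years_py, impute_missing_years_py_alt]
  set keyf : List (String × Int) → Int := fun doc => (PySem.Dict.mk doc).getD "Year" 0 with hkeyf
  set years := docs.filterMap (fun doc => (PySem.Dict.mk doc).get? "Year") with hyrs
  set ex := PySem.Set.ofList years with hex
  set pairs := docs.filterMap (fun doc =>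
      if (PySem.Dict.mk doc).contains "Year"
      then some ((PySem.Dict.mk doc).getD "Year" 0, doc) else none) with hpairs
  set groups := pairs.foldl (fun g p => g.modify p.1 [] (fun l => l ++ [p.2]))
      (PySem.Dict.empty : PySem.Dict Int (List (List (String × Int)))) with hgroups
  have size_eq : groups.size = ex.length := by
    have h2 : groups.keys.length = groups.size := by
      simp [PySem.Dict.keys, PySem.Dict.size]
    rw [← h2, keys_eq]
  by_cases hgt : 1 < ex.length
  · rw [if_pos hgt, if_neg (by omega)]
    have hall : ∀ doc ∈ docs, (PySem.Dict.mk doc).contains "Year" = true := by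
      rcases hpre with h | h
      · exfalso
        have hds : PySem.List.dedup years = ex := by rw [hex]; simp
        rw [hds] at h
        omega
      · exact h
    have pairs_eq : pairs = docs.map (fun d => (keyf d, d)) := pv_pairs_eq_map docs hall
    have hyears_eq : years = docs.map keyf := by
      have hpm := pv_pairs_map_fst docs
      rw [← hpairs, ← hyrs] at hpm
      rw [← hpm, pairs_eq, List.map_map]
      rfl
    rw [keys_eq]
    have hne : ex ≠ [] := by intro h; rw [h] at hgt; simp at hgt
    obtain ⟨m, hmin⟩ : ∃ m, PySem.List.min? ex (fun y => y) = some m := by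
      cases h : PySem.List.min? ex (fun y => y) with
      | none => exact absurd ((PySem.List.min?_eq_none_iff _ _).mp h) hne
      | some m => exact ⟨m, rfl⟩
    obtain ⟨M, hmax⟩ : ∃ M, PySem.List.max? ex (fun y => y) = some M := by
      cases h : PySem.List.max? ex (fun y => y) with
      | none => exact absurd ((PySem.List.max?_eq_none_iff _ _).mp h) hne
      | some M => exact ⟨M, rfl⟩
    rw [hmin, hmax]
    simp only [Option.getD_some]
    set r := PySem.List.pyRange m (M + 1) 1 with hr
    set missing := PySem.Set.diff (PySem.Set.ofList r) ex with hmiss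
    -- membership facts
    have hmem_docs : ∀ d ∈ docs, keyf d ∈ ex := by
      intro d hd
      rw [hex, PySem.Set.mem_ofList _ _, hyears_eq]
      exact List.mem_map_of_mem hd
    have hmem_ex_r : ∀ y ∈ ex, y ∈ r := by
      intro y hy
      rw [hr, PySem.List.mem_pyRange_one]
      have h1 := PySem.List.min?_isMin hmin y hy
      have h2 := PySem.List.max?_isMax hmax y hy
      simp only at h1 h2
      omega
    have hmem_missing_r : ∀ z ∈ missing, z ∈ r := by
      intro z hz
      rw [hmiss, PySem.Set.mem_diff _ _ _] at hz
      exact (PySem.Set.mem_ofList _ _).mp hz.1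
    have hkey_new : ∀ z, keyf (pvMkDoc fields default z) = z := fun z => pv_key_mkdoc fields default z
    -- A side: the sort is the bucket concatenation
    have hA : PySem.List.sorted (docs ++ missing.map (fun year => pvMkDoc fields default year)) keyf false
        = r.flatMap (fun y => (docs ++ missing.map (fun year => pvMkDoc fields default year)).filter
            (fun z => keyf z == y)) := by
      apply pv_sorted_buckets keyf r _ (PySem.List.pairwise_lt_pyRange_one m (M+1))
      intro x hx
      rcases List.mem_append.mp hx with h | h
      · exact hmem_ex_r _ (hmem_docs x h)
      · rcases List.mem_map.mp h with ⟨z, hz, rfl⟩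
        rw [hkey_new z]
        exact hmem_missing_r z hz
    rw [hA]
    -- B side: the fold is a flatMap
    have hfold : (fun (result : List (List (String × Int))) year =>
          if groups.contains year then result ++ groups.getD year []
          else result ++ [pvMkDoc fields default year])
        = fun result year => result ++ (if groups.contains year then groups.getD year []
            else [pvMkDoc fields default year]) := by
      funext res y
      by_cases h : groups.contains y = true <;> simp [h]
    rw [hfold, PySem.List.foldl_append_eq_flatMap, List.nil_append]
    -- pointwise
    apply List.flatMap_congr
    intro y hyr
    have hcy : groups.contains y = decide (y ∈ ex) := by
      rw [PySem.Dict.contains_eq_decide_mem_keys, hgroups, keys_eq]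
    have getD_eq : groups.getD y [] = (pairs.filter (fun p => p.1 == y)).map (fun p => p.2) := by
      have h3 := PySem.Dict.getD_foldl_modify_append pairs
        (PySem.Dict.empty : PySem.Dict Int (List (List (String × Int)))) y
      rw [hgroups]
      rw [h3, PySem.Dict.getD_empty, List.nil_append]
    have hnewfilter : ((missing.map (fun year => pvMkDoc fields default year)).filter
          (fun z => keyf z == y))
        = (missing.filter (fun z => z == y)).map (fun year => pvMkDoc fields default year) := by
      rw [List.filter_map]
      have hcmp : ((fun z => keyf z == y) ∘ fun year => pvMkDoc fields default year)
          = fun z => z == y := by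
        funext z
        simp [Function.comp, hkey_new]
      rw [hcmp]
    rw [List.filter_append, hnewfilter]
    by_cases hymem : y ∈ ex
    · rw [if_pos (by rw [hcy]; simpa using hymem)]
      have hmf : missing.filter (fun z => z == y) = [] := by
        apply List.filter_eq_nil_iff.mpr
        intro z hz
        simp only [beq_iff_eq]
        rintro rfl
        exact ((PySem.Set.mem_diff _ _ _).mp (hmiss ▸ hz)).2 hymem
      rw [hmf, List.map_nil, List.append_nil]
      rw [getD_eq, pairs_eq, List.filter_map, List.map_map]
      simp [Function.comp_def]
    · rw [if_neg (by rw [hcy]; simpa using hymem)]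
      have hdf : docs.filter (fun z => keyf z == y) = [] := by
        apply List.filter_eq_nil_iff.mpr
        intro d hd
        simp only [beq_iff_eq]
        rintro rfl
        exact hymem (hmem_docs d hd)
      have hymiss : y ∈ missing := by
        rw [hmiss, PySem.Set.mem_diff _ _ _]
        exact ⟨(PySem.Set.mem_ofList _ _).mpr hyr, hymem⟩
      have hnd : missing.Nodup := by
        rw [hmiss]
        exact PySem.Set.nodup_diff _ _ (PySem.Set.nodup_ofList r)
      rw [hdf, List.nil_append, pv_filter_nodup_mem missing y hnd hymiss]
      rfl
  · rw [if_neg hgt, if_pos (by omega)]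

-- ===== VERDICT (by name: the statement is the Claim_ definition above) =====
theorem impute_missing_years_py_spec : Claim_equal_impute_missing_years_py := by
  intro docs fields default _ hpre
  exact pv_agree docs fields default hpre
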